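-- pv_equiv track=rewrite | github.com/willytai/ML2018SPRING | hw1/train.py | check
-- ===== SOURCE A (Python) =====
-- def check(i) :
-- 	if i < 471:
-- 		return True
-- 	j = i
-- 	while(j > 480):
-- 		j = j - 480
-- 	if j > 470:
-- 		return False
-- ===== SOURCE B (Python) =====
-- def check(i):
--     if i < 471:
--         return True
--     j = (i - 1) % 480 + 1
--     if j > 470:
--         return False
-- ===== Notes on version B (the rewrite author's own statement) =====
-- stated objective: faster
-- what changed: Replaces the repeated-subtraction while loop with the closed-form modulo j = (i-1)%480+1, preserving the implicit None fall-through.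
import Mathlib
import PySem

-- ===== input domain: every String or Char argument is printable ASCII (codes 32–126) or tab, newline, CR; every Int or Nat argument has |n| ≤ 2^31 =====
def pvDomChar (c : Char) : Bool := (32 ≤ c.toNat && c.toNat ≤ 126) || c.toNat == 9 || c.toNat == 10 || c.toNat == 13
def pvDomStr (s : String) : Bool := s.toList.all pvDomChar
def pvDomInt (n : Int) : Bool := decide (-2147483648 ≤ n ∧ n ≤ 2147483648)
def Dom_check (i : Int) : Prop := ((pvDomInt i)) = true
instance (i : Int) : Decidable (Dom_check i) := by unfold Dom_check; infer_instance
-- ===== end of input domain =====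

-- B replaces A's repeated-subtraction while loop with the equivalent closed-form modulo (i-1)%480+1.


-- ===== PORT A =====
-- the while(j > 480): j = j - 480 loop, step for step
def checkLoop (j : Int) : Int :=
  if h : j > 480 then checkLoop (j - 480) else j
termination_by j.toNat
decreasing_by omega

def check (i : Int) : Option Bool :=
  if i < 471 then some true
  else
    let j := checkLoop i
    if j > 470 then some false else none

-- ===== PORT B =====
def check_alt (i : Int) : Option Bool :=
  if i < 471 then some true
  else
    let j := PySem.Int.mod (i - 1) 480 + 1
    if j > 470 then some false else none

-- ===== PRECONDITION & SPEC =====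
def Spec_check (i : Int) (out : Option Bool) : Prop := out = check_alt i
instance (i : Int) (out : Option Bool) : Decidable (Spec_check i out) := by unfold Spec_check; infer_instance

-- ===== CLAIM (what is proved, stated in full; the proofs are below) =====
def Claim_equal_check : Prop := ∀ (i : Int), Dom_check i → Spec_check i (check i)

-- ===== LEMMAS AND PROOFS =====

-- the loop computes the shifted modulo on positive input
theorem checkLoop_eq (j : Int) (hj : 1 ≤ j) : checkLoop j = (j - 1) % 480 + 1 := by
  rw [checkLoop]
  split_ifs with h
  · rw [checkLoop_eq (j - 480) (by omega)]
    omega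
  · omega
termination_by j.toNat
decreasing_by omega

-- ===== VERDICT (by name: the statement is the Claim_ definition above) =====
theorem check_spec : Claim_equal_check := by
  intro i _
  unfold Spec_check check check_alt
  split_ifs with h
  · rfl
  · simp only [PySem.Int.mod]
    rw [checkLoop_eq i (by omega)]
    simp [Int.fmod_eq_emod]
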